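-- pv_equiv track=rewrite | github.com/daniel-reich/ubiquitous-fiesta | qKBfL9pQBaqXvKTfW_10.py | sum_of_slices
-- ===== SOURCE A (Python) =====
-- def sum_of_slices(lst):
--   temp = []
--   result = []
--   for x in lst:
--     if sum(temp) + x <= 100:
--       temp.append(x)
--     else:
--       result.append(sum(temp))
--       temp.clear()
--       temp.append(x)
--   result.append(sum(temp))
--   return result
-- ===== SOURCE B (Python) =====
-- def sum_of_slices(lst):
--     # prefix sums, then one scan over them: emit prefix differences at cut points
--     prefix = [0]
--     for x in lst:
--         prefix.append(prefix[-1] + x)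
--     result = []
--     base = 0   # prefix value at the current group's start
--     last = 0   # previous prefix value
--     for p in prefix[1:]:
--         if p - base > 100:
--             result.append(last - base)
--             base = last
--         last = p
--     result.append(prefix[-1] - base)
--     return result
-- ===== Notes on version B (the rewrite author's own statement) =====
-- stated objective: faster
-- what changed: A re-sums the current slice with sum(temp) on every element; B builds a prefix-sum array once and scans it, emitting prefix differences at cut points, so no slice is ever re-summed.
import Mathlib
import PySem

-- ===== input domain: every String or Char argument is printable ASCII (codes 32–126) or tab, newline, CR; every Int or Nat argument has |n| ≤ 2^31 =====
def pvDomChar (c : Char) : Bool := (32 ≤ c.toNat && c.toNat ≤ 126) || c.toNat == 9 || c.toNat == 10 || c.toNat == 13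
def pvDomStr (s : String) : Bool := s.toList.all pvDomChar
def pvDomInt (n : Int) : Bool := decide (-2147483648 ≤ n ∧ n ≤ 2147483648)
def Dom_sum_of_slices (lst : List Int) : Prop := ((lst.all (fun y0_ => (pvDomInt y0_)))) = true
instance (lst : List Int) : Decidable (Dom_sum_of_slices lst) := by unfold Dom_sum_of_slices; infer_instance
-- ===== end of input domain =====

-- B replaces A's quadratic re-summing greedy loop by a prefix-sum array scanned once,
-- emitting prefix differences at cut points (objective: faster, O(n) vs O(n^2)).

-- ===== PORT A =====
-- state: (temp, result); sum(temp) recomputed each step, as in A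
def sum_of_slices (lst : List Int) : List Int :=
  let s := lst.foldl (fun (s : List Int × List Int) x =>
    if s.1.sum + x ≤ 100 then (s.1 ++ [x], s.2)
    else ([x], s.2 ++ [s.1.sum])) ([], [])
  s.2 ++ [s.1.sum]

-- ===== PORT B =====
-- prefix[-1] is ported with PySem.List.pyGetD … (-1) 0; prefix is never empty, so this is exact
def sum_of_slices_alt (lst : List Int) : List Int :=
  let pre := lst.foldl (fun p x => p ++ [PySem.List.pyGetD p (-1) 0 + x]) [0]
  let s := (PySem.List.slice pre (some 1) none).foldl
    (fun (s : List Int × Int × Int) p =>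
      if p - s.2.1 > 100 then (s.1 ++ [s.2.2 - s.2.1], s.2.2, p)
      else (s.1, s.2.1, p)) ([], 0, 0)
  s.1 ++ [PySem.List.pyGetD pre (-1) 0 - s.2.1]

-- ===== PRECONDITION & SPEC =====
def Spec_sum_of_slices (lst : List Int) (out : List Int) : Prop := out = sum_of_slices_alt lst
instance (lst : List Int) (out : List Int) : Decidable (Spec_sum_of_slices lst out) := by unfold Spec_sum_of_slices; infer_instance

-- ===== CLAIM (what is proved, stated in full; the proofs are below) =====
def Claim_equal_sum_of_slices : Prop := ∀ (lst : List Int), Dom_sum_of_slices lst → Spec_sum_of_slices lst (sum_of_slices lst)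

-- ===== LEMMAS AND PROOFS =====

-- common specification: greedy group sums with running total t
def groupSums (t : Int) : List Int → List Int
  | [] => [t]
  | x :: xs => if t + x ≤ 100 then groupSums (t + x) xs else t :: groupSums x xs

-- prefix-sum list starting at a
def scanPS (a : Int) : List Int → List Int
  | [] => [a]
  | x :: xs => a :: scanPS (a + x) xs

theorem scanPS_ne_nil (a : Int) (xs : List Int) : scanPS a xs ≠ [] := by
  cases xs <;> simp [scanPS]

theorem scanPS_getLast (a : Int) (xs : List Int) :
    (scanPS a xs).getLast (scanPS_ne_nil a xs) = a + xs.sum := by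
  induction xs generalizing a with
  | nil => simp [scanPS]
  | cons x xs ih =>
    simp only [scanPS]
    rw [List.getLast_cons (scanPS_ne_nil _ _), ih]
    push_cast [List.sum_cons]; ring

def stepA (s : List Int × List Int) (x : Int) : List Int × List Int :=
  if s.1.sum + x ≤ 100 then (s.1 ++ [x], s.2) else ([x], s.2 ++ [s.1.sum])

def stepB (s : List Int × Int × Int) (p : Int) : List Int × Int × Int :=
  if p - s.2.1 > 100 then (s.1 ++ [s.2.2 - s.2.1], s.2.2, p) else (s.1, s.2.1, p)

theorem lemA (xs : List Int) : ∀ (temp result : List Int),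
    (xs.foldl stepA (temp, result)).2 ++ [(xs.foldl stepA (temp, result)).1.sum]
      = result ++ groupSums temp.sum xs := by
  induction xs with
  | nil => intro temp result; simp [groupSums]
  | cons x xs ih =>
    intro temp result
    simp only [List.foldl_cons, stepA]
    by_cases h : temp.sum + x ≤ 100
    · rw [if_pos h, groupSums, if_pos h, ih]
      simp
    · rw [if_neg h, groupSums, if_neg h, ih]
      simp

theorem prefix_eq_scanPS (xs : List Int) : ∀ (p : List Int) (hp : p ≠ []),
    xs.foldl (fun p x => p ++ [PySem.List.pyGetD p (-1) 0 + x]) p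
      = p.dropLast ++ scanPS (p.getLast hp) xs := by
  induction xs with
  | nil => intro p hp; simp [scanPS, List.dropLast_concat_getLast hp]
  | cons x xs ih =>
    intro p hp
    simp only [List.foldl_cons]
    rw [PySem.List.pyGetD_neg_one _ _ hp,
        ih (p ++ [p.getLast hp + x]) (by simp)]
    simp only [scanPS]
    nth_rewrite 1 [← List.dropLast_concat_getLast hp]
    simp

theorem scanPS_cons_drop (a : Int) (xs : List Int) :
    scanPS a xs = a :: (scanPS a xs).drop 1 := by
  cases xs <;> simp [scanPS]

theorem lemB (xs : List Int) : ∀ (a base : Int) (result : List Int),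
    (((scanPS a xs).drop 1).foldl stepB (result, base, a)).1
        ++ [a + xs.sum - (((scanPS a xs).drop 1).foldl stepB (result, base, a)).2.1]
      = result ++ groupSums (a - base) xs := by
  induction xs with
  | nil => intro a base result; simp [scanPS, groupSums]
  | cons x xs ih =>
    intro a base result
    have hdrop : (scanPS a (x :: xs)).drop 1 = scanPS (a + x) xs := by
      simp [scanPS]
    rw [hdrop, scanPS_cons_drop (a + x) xs, List.foldl_cons]
    simp only [stepB]
    by_cases h : a + x - base > 100
    · rw [if_pos h, groupSums, if_neg (by omega)]
      have := ih (a + x) a (result ++ [a - base])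
      rw [show a + (x :: xs).sum = (a + x) + xs.sum by simp [List.sum_cons]; ring,
          this]
      simp [show a + x - a = x by ring]
    · rw [if_neg h, groupSums, if_pos (by omega)]
      have := ih (a + x) base result
      rw [show a + (x :: xs).sum = (a + x) + xs.sum by simp [List.sum_cons]; ring,
          this]
      ring_nf

theorem ports_agree (lst : List Int) : sum_of_slices lst = sum_of_slices_alt lst := by
  unfold sum_of_slices sum_of_slices_alt
  simp only []
  rw [show (fun (s : List Int × List Int) x =>
        if s.1.sum + x ≤ 100 then (s.1 ++ [x], s.2)
        else ([x], s.2 ++ [s.1.sum])) = stepA from rfl]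
  rw [show (fun (s : List Int × Int × Int) p =>
        if p - s.2.1 > 100 then (s.1 ++ [s.2.2 - s.2.1], s.2.2, p)
        else (s.1, s.2.1, p)) = stepB from rfl]
  rw [prefix_eq_scanPS lst [0] (by simp)]
  simp only [List.dropLast_singleton, List.getLast_singleton, List.nil_append]
  rw [PySem.List.pyGetD_neg_one _ _ (scanPS_ne_nil 0 lst),
      scanPS_getLast 0 lst, PySem.List.slice_from_one]
  simp only [← List.drop_one]
  have hA := lemA lst [] []
  simp only [List.sum_nil, List.nil_append] at hA
  have hB := lemB lst 0 0 []
  simp only [List.nil_append, sub_zero] at hB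
  rw [hA, ← hB]

-- ===== VERDICT (by name: the statement is the Claim_ definition above) =====
theorem sum_of_slices_spec : Claim_equal_sum_of_slices := by
  intro lst _
  unfold Spec_sum_of_slices
  exact ports_agree lst
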